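-- pv_equiv track=rewrite | github.com/AIVLE-School5-DX8-Study/Codingtest-Study | 안성익/[PGS]기능개발/[PGS]기능개발.py | count_lower_val
-- ===== SOURCE A (Python) =====
-- def count_lower_val(start, visited, days):
--     visited[start] = True
--     cnt = 0
--     for i in range(start, len(visited)):
--         if days[i] > days[start]:
--             return cnt
--         else:
--             visited[i] = True
--             cnt += 1
--     return cnt
-- ===== SOURCE B (Python) =====
-- def count_lower_val(start, visited, days):
--     pivot = days[start]
--     runmax = pivot
--     cnt = 0
--     for d in days[start:len(visited)]:
--         runmax = max(runmax, d)
--         cnt += 1 if runmax <= pivot else 0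
--     visited[start:start + cnt] = [True] * cnt
--     return cnt
-- ===== Notes on version B (the rewrite author's own statement) =====
-- stated objective: alternative
-- what changed: A marks visited while scanning and early-returns at the first larger day; B never early-exits: it folds over the whole segment maintaining a running maximum and counts the positions whose running maximum is still <= days[start] (a prefix-max characterisation of the run), then bulk-marks the counted slice in one assignment.
-- outside the precondition, e.g. on count_lower_val(-1, [False], [1]): A returns 2, B returns 1; on count_lower_val(-1, [False, False], [1, 5]): A returns 3, B returns 1
import Mathlib
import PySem

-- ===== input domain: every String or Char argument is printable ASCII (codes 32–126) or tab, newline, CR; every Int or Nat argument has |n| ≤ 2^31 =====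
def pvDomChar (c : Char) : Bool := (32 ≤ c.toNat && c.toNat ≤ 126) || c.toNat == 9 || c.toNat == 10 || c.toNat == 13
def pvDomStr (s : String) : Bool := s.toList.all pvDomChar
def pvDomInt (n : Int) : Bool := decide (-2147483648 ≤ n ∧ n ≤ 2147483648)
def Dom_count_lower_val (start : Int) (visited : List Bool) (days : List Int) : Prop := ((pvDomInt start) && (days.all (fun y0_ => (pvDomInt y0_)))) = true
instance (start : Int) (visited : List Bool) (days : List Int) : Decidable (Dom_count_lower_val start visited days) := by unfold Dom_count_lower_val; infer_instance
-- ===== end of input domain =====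

-- B replaces A's mark-while-scanning early-return loop by a full fold maintaining a running maximum,
-- counting positions whose prefix-max is still <= days[start], then bulk-marks the slice (alternative,
-- same cost); both mutate `visited` in place — the equivalence proved here is about the RETURN value
-- only (inside Pre_ the mutations coincide as well).


-- ===== PORT A =====
-- A's loop: for i in range(start, len(visited)): return cnt on days[i] > days[start], else cnt += 1.
-- (The in-place marking of `visited` has no effect on the return value and is not modelled.)
def pvAGo (days : List Int) (pivot : Int) : List Int → Int → Int
  | [], cnt => cnt
  | i :: rest, cnt =>
    match PySem.List.pyGet? days i with
    | none => cnt                      -- days[i] raises IndexError (outside Pre_)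
    | some d => if d > pivot then cnt else pvAGo days pivot rest (cnt + 1)

def count_lower_val (start : Int) (visited : List Bool) (days : List Int) : Int :=
  match PySem.List.pyGet? days start with
  | none => 0                          -- days[start] raises IndexError (outside Pre_)
  | some pivot => pvAGo days pivot (PySem.List.pyRange start (visited.length : Int) 1) 0

-- ===== PORT B =====
-- B: pivot = days[start]; fold over days[start:len(visited)] with state (runmax, cnt):
--    runmax = max(runmax, d); cnt += 1 if runmax <= pivot else 0; return cnt.
def count_lower_val_alt (start : Int) (visited : List Bool) (days : List Int) : Int :=
  match PySem.List.pyGet? days start with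
  | none => 0                          -- days[start] raises IndexError (outside Pre_)
  | some pivot =>
    let seg := PySem.List.slice days (some start) (some (visited.length : Int))
    (seg.foldl (fun (st : Int × Int) d =>
        let m := max st.1 d
        (m, st.2 + if m ≤ pivot then 1 else 0)) (pivot, 0)).2

-- ===== PRECONDITION & SPEC =====
-- Pre_ restricts to the task's natural domain 0 ≤ start < len(visited) ≤ len(days): outside it A either
-- raises IndexError (start out of range of visited, or visited longer than days) or indexes with Python's
-- negative-index wraparound, which is outside the function's intended use.
def Pre_count_lower_val (start : Int) (visited : List Bool) (days : List Int) : Prop :=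
  0 ≤ start ∧ start < visited.length ∧ visited.length ≤ days.length
instance (start : Int) (visited : List Bool) (days : List Int) : Decidable (Pre_count_lower_val start visited days) := by unfold Pre_count_lower_val; infer_instance

def pvWitness_count_lower_val : Int × List Bool × List Int := (0, [false, false], [2, 3])

def Spec_count_lower_val (start : Int) (visited : List Bool) (days : List Int) (out : Int) : Prop := out = count_lower_val_alt start visited days
instance (start : Int) (visited : List Bool) (days : List Int) (out : Int) : Decidable (Spec_count_lower_val start visited days out) := by unfold Spec_count_lower_val; infer_instance

-- ===== CLAIM (what is proved, stated in full; the proofs are below) =====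
def Claim_equal_count_lower_val : Prop := ∀ (start : Int) (visited : List Bool) (days : List Int), Dom_count_lower_val start visited days → Pre_count_lower_val start visited days → Spec_count_lower_val start visited days (count_lower_val start visited days)

-- ===== LEMMAS AND PROOFS =====

-- Once the running maximum exceeds the pivot it stays there and nothing more is counted.
theorem pvFold_gt (pivot : Int) (seg : List Int) (m c : Int) (hm : pivot < m) :
    (seg.foldl (fun (st : Int × Int) d =>
        let m' := max st.1 d
        (m', st.2 + if m' ≤ pivot then 1 else 0)) (m, c)).2 = c := by
  induction seg generalizing m c with
  | nil => simp
  | cons d rest ih =>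
    have h1 : pivot < max m d := lt_of_lt_of_le hm (le_max_left m d)
    simp only [List.foldl_cons]
    rw [show (if max m d ≤ pivot then (1:Int) else 0) = 0 from if_neg (by omega)]
    simpa using ih (max m d) c h1

-- Starting from runmax = pivot, B's fold counts the length of the ≤-pivot prefix.
theorem pvFold_spec (pivot : Int) (seg : List Int) (c : Int) :
    (seg.foldl (fun (st : Int × Int) d =>
        let m' := max st.1 d
        (m', st.2 + if m' ≤ pivot then 1 else 0)) (pivot, c)).2
      = c + ((seg.takeWhile (fun d => !(d > pivot))).length : Int) := by
  induction seg generalizing c with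
  | nil => simp
  | cons d rest ih =>
    by_cases h : d > pivot
    · have hmax : max pivot d = d := max_eq_right (le_of_lt h)
      simp only [List.foldl_cons]
      rw [List.takeWhile_cons_of_neg (by simp [h])]
      rw [show (if max pivot d ≤ pivot then (1:Int) else 0) = 0 from if_neg (by omega)]
      simpa [hmax] using pvFold_gt pivot rest d c h
    · have hmax : max pivot d = pivot := max_eq_left (by omega)
      simp only [List.foldl_cons]
      rw [List.takeWhile_cons_of_pos (by simp [h])]
      rw [show (if max pivot d ≤ pivot then (1:Int) else 0) = 1 from if_pos (by omega)]
      rw [hmax, ih (c + 1)]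
      simp only [List.length_cons]
      push_cast
      ring

-- A's loop over range(i, n) counts the same prefix of days[i:n], shifted by cnt.
theorem pvAGo_spec (days : List Int) (pivot : Int) (n : Nat) (hn : n ≤ days.length) :
    ∀ (i : Nat), i ≤ n → ∀ (cnt : Int),
      pvAGo days pivot (PySem.List.pyRange (i : Int) (n : Int) 1) cnt
        = cnt + ((((days.drop i).take (n - i)).takeWhile (fun d => !(d > pivot))).length : Int) := by
  intro i
  induction hk : n - i generalizing i with
  | zero =>
    intro hi cnt
    have hni : n = i := by omega
    subst hni
    rw [PySem.List.pyRange_one_eq_nil (by omega)]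
    simp [pvAGo]
  | succ k ih =>
    intro hi cnt
    have hlt : i < n := by omega
    have hid : i < days.length := by omega
    rw [PySem.List.pyRange_one_cons (by exact_mod_cast hlt)]
    have hcast : (i : Int) + 1 = ((i + 1 : Nat) : Int) := by push_cast; ring
    rw [hcast]
    have hget : PySem.List.pyGet? days (i : Int) = some days[i] := by
      rw [PySem.List.pyGet?_natCast, List.getElem?_eq_getElem hid]
    have htake : (days.drop i).take (k + 1)
        = days[i] :: ((days.drop (i + 1)).take k) := by
      rw [List.drop_eq_getElem_cons hid, List.take_succ_cons]
    have hk' : n - (i + 1) = k := by omega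
    rw [htake]
    by_cases h : days[i] > pivot
    · rw [show pvAGo days pivot ((i : Int) :: PySem.List.pyRange ((i+1 : Nat) : Int) (n : Int) 1) cnt
            = cnt from by simp [pvAGo, hget, h]]
      rw [List.takeWhile_cons_of_neg (by simp [h])]
      simp
    · rw [show pvAGo days pivot ((i : Int) :: PySem.List.pyRange ((i+1 : Nat) : Int) (n : Int) 1) cnt
            = pvAGo days pivot (PySem.List.pyRange ((i+1 : Nat) : Int) (n : Int) 1) (cnt + 1) from by
          simp [pvAGo, hget, h]]
      rw [ih (i + 1) hk' (by omega) (cnt + 1),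
        List.takeWhile_cons_of_pos (by simp [h])]
      simp only [List.length_cons]
      push_cast
      ring

-- ===== VERDICT (by name: the statement is the Claim_ definition above) =====
theorem count_lower_val_spec : Claim_equal_count_lower_val := by
  unfold Claim_equal_count_lower_val
  intro start visited days _ hpre
  obtain ⟨h0, hlt, hle⟩ := hpre
  unfold Spec_count_lower_val count_lower_val count_lower_val_alt
  obtain ⟨s, rfl⟩ : ∃ s : Nat, start = (s : Int) := ⟨start.toNat, (Int.toNat_of_nonneg h0).symm⟩
  set n := visited.length with hn
  have hsn : s < n := by exact_mod_cast hlt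
  have hsd : s < days.length := by omega
  rw [PySem.List.pyGet?_natCast, List.getElem?_eq_getElem hsd]
  simp only
  rw [PySem.List.slice_natCast, pvFold_spec,
      pvAGo_spec days days[s] n (by omega) s (by omega) 0]
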